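-- pv_equiv track=rewrite | github.com/AaSuLeer/job_check_deputy | main.py | find_missing_students
-- ===== SOURCE A (Python) =====
-- def find_missing_students(names, files):
--     submitted = set()
--
--     for name in names:
--         for f in files:
--             if name in f:
--                 submitted.add(name)
--                 break
--
--     missing = [name for name in names if name not in submitted]
--     return submitted, missing
-- ===== SOURCE B (Python) =====
-- def find_missing_students(names, files):
--     # Inverted loops: stream the files once, shrinking a pending set of not-yet-matched names.
--     pending = set(names)
--     for f in files:
--         pending = {n for n in pending if n not in f}
--     submitted = set(names) - pending
--     missing = [n for n in names if n in pending]
--     return submitted, missing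
-- ===== Notes on version B (the rewrite author's own statement) =====
-- stated objective: alternative
-- what changed: A loops names-outer with a break over files and a set of matched names; B inverts the nesting: it streams the files, shrinking a pending set of not-yet-matched names (so matched names drop out of later scans), then derives submitted and missing from the surviving pending set.
import Mathlib
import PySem

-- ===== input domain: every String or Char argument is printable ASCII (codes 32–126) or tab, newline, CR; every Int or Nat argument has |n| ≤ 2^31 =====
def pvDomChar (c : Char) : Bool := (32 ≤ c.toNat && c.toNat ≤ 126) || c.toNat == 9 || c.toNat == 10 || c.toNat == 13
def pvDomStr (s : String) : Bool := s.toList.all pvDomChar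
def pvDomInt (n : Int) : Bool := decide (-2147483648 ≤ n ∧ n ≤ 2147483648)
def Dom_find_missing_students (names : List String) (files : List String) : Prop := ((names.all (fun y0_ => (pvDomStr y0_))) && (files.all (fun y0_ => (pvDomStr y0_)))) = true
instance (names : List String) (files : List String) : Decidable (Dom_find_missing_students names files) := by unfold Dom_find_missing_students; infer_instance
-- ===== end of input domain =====

-- B inverts the loop nesting: it streams the files, shrinking a pending set of unmatched names, instead of scanning the files per name (objective: alternative).

-- ===== PORT A =====
-- 'for f in files: if name in f: submitted.add(name); break'
def fmsInner (name : String) (acc : PySem.Set String) : List String → PySem.Set String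
  | [] => acc
  | f :: rest => if PySem.Str.isIn name f then PySem.Set.add acc name else fmsInner name acc rest

def find_missing_students (names : List String) (files : List String) : List String × List String :=
  let submitted := names.foldl (fun acc name => fmsInner name acc files) PySem.Set.empty
  let missing := names.filter (fun name => !(PySem.Set.contains submitted name))
  (submitted, missing)

-- ===== PORT B =====
-- pending = set(names); for f in files: pending = {n for n in pending if n not in f}
def find_missing_students_alt (names : List String) (files : List String) : List String × List String :=
  let pending := files.foldl
    (fun (p : PySem.Set String) f => p.filter (fun n => !(PySem.Str.isIn n f)))
    (PySem.Set.ofList names)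
  let submitted := PySem.Set.diff (PySem.Set.ofList names) pending
  let missing := names.filter (fun n => PySem.Set.contains pending n)
  (submitted, missing)

-- ===== PRECONDITION & SPEC =====
def Spec_find_missing_students (names : List String) (files : List String) (out : List String × List String) : Prop := out = find_missing_students_alt names files
instance (names : List String) (files : List String) (out : List String × List String) : Decidable (Spec_find_missing_students names files out) := by unfold Spec_find_missing_students; infer_instance

-- ===== CLAIM (what is proved, stated in full; the proofs are below) =====
def Claim_equal_find_missing_students : Prop := ∀ (names : List String) (files : List String), Dom_find_missing_students names files → Spec_find_missing_students names files (find_missing_students names files)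

-- ===== LEMMAS AND PROOFS =====

-- A's inner break-loop adds name iff some file contains it
theorem fmsInner_eq (name : String) (acc : PySem.Set String) (files : List String) :
    fmsInner name acc files =
      if files.any (fun f => PySem.Str.isIn name f) then PySem.Set.add acc name else acc := by
  induction files with
  | nil => rfl
  | cons f rest ih =>
    rw [fmsInner, List.any_cons]
    cases h : PySem.Str.isIn name f
    · rw [Bool.false_or, ih, if_neg Bool.false_ne_true]
    · simp only [Bool.true_or, if_true]

-- A's outer loop is set-update by the matched names, in names order
theorem fmsFold_eq_update (files : List String) (names : List String) (s : PySem.Set String) :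
    names.foldl (fun acc name => fmsInner name acc files) s =
      PySem.Set.update s (names.filter (fun n => files.any (fun f => PySem.Str.isIn n f))) := by
  induction names generalizing s with
  | nil => rw [List.foldl_nil, List.filter_nil, PySem.Set.update_nil]
  | cons n rest ih =>
    rw [List.foldl_cons, fmsInner_eq, List.filter_cons]
    cases h : List.any files (fun f => PySem.Str.isIn n f)
    · rw [if_neg Bool.false_ne_true, ih, if_neg Bool.false_ne_true]
    · rw [if_pos rfl, if_pos rfl, ih, PySem.Set.update_cons]

-- B's fold of filters is one filter by "no file contains n"
theorem foldl_filter_eq (files : List String) (s : PySem.Set String) :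
    files.foldl (fun (p : PySem.Set String) f => p.filter (fun n => !(PySem.Str.isIn n f))) s =
      s.filter (fun n => files.all (fun f => !(PySem.Str.isIn n f))) := by
  induction files generalizing s with
  | nil => simp only [List.foldl_nil, List.all_nil, List.filter_true]
  | cons f rest ih =>
    rw [List.foldl_cons, ih, List.filter_filter]
    apply List.filter_congr
    intro n _
    rw [List.all_cons, Bool.and_comm]

-- dedup-first commutes with filter
theorem ofList_filter (q : String → Bool) (xs : List String) :
    PySem.Set.ofList (xs.filter q) = (PySem.Set.ofList xs).filter q := by
  induction xs with
  | nil => rfl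
  | cons x rest ih =>
    rw [List.filter_cons]
    cases h : q x
    · rw [if_neg Bool.false_ne_true, ih, PySem.Set.ofList_cons, List.filter_cons, h,
        if_neg Bool.false_ne_true, PySem.Set.discard, List.filter_filter]
      apply List.filter_congr
      intro n _
      by_cases hn : n = x
      · subst hn; simp [h]
      · simp [hn]
    · rw [if_pos rfl, PySem.Set.ofList_cons, PySem.Set.ofList_cons, List.filter_cons, h,
        if_pos rfl, ih, PySem.Set.discard, PySem.Set.discard, List.filter_filter,
        List.filter_filter]
      congr 1
      apply List.filter_congr
      intro n _
      exact Bool.and_comm _ _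

-- Bool form of membership for pending: for n ∈ set(names), pending-membership is "no file contains n"
theorem contains_pending (names files : List String) (n : String) (hn : n ∈ names) :
    PySem.Set.contains
      ((PySem.Set.ofList names).filter (fun m => files.all (fun f => !(PySem.Str.isIn m f)))) n =
      files.all (fun f => !(PySem.Str.isIn n f)) := by
  cases h : files.all (fun f => !(PySem.Str.isIn n f))
  · cases hc : PySem.Set.contains
        ((PySem.Set.ofList names).filter (fun m => files.all (fun f => !(PySem.Str.isIn m f)))) n
    · rfl
    · have := (PySem.Set.contains_iff _ _).mp hc
      rw [List.mem_filter] at this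
      rw [this.2] at h
      simp at h
  · exact (PySem.Set.contains_iff _ _).mpr
      (List.mem_filter.mpr ⟨(PySem.Set.mem_ofList _ _).mpr hn, h⟩)

-- ===== VERDICT (by name: the statement is the Claim_ definition above) =====
theorem find_missing_students_spec : Claim_equal_find_missing_students := by
  intro names files _
  unfold Spec_find_missing_students find_missing_students find_missing_students_alt
  rw [foldl_filter_eq, fmsFold_eq_update, PySem.Set.update_empty, ofList_filter]
  have hsub : (PySem.Set.ofList names).filter
        (fun n => files.any (fun f => PySem.Str.isIn n f)) =
      PySem.Set.diff (PySem.Set.ofList names)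
        ((PySem.Set.ofList names).filter (fun m => files.all (fun f => !(PySem.Str.isIn m f)))) := by
    rw [PySem.Set.diff]
    apply List.filter_congr
    intro n hn
    rw [contains_pending names files n ((PySem.Set.mem_ofList _ _).mp hn)]
    simp [List.any_eq_not_all_not]
  refine Prod.ext hsub ?_
  apply List.filter_congr
  intro n hn
  rw [contains_pending names files n hn]
  have : PySem.Set.contains
      ((PySem.Set.ofList names).filter (fun m => files.any (fun f => PySem.Str.isIn m f))) n =
      files.any (fun f => PySem.Str.isIn n f) := by
    cases h : files.any (fun f => PySem.Str.isIn n f)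
    · cases hc : PySem.Set.contains
          ((PySem.Set.ofList names).filter (fun m => files.any (fun f => PySem.Str.isIn m f))) n
      · rfl
      · have := (PySem.Set.contains_iff _ _).mp hc
        rw [List.mem_filter] at this
        rw [this.2] at h
        simp at h
    · exact (PySem.Set.contains_iff _ _).mpr
        (List.mem_filter.mpr ⟨(PySem.Set.mem_ofList _ _).mpr hn, h⟩)
  rw [this]
  simp [List.all_eq_not_any_not]
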